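-- pv_equiv track=rewrite | github.com/Komodo/KomodoEdit | src/python-sitelib/eollib.py | getMixedEOLLineNumbers
-- ===== SOURCE A (Python) =====
-- EOL_LF = 0
--
-- EOL_CR = 1
--
-- EOL_CRLF = 2
--
-- def getMixedEOLLineNumbers(buffer, expectedEOL=None):
--     r"""getMixedEOLLineNumbers('a\nb\r\nc\nd\n') => [1]
--
--         "buffer" is the buffer to analyze
--         "expectedEOL" indicates the expected EOL for each line, it is one of
--             the EOL_LF, EOL_CR, EOL_CRLF constants. It may also be left out
--             (or None) to indicate that the most common EOL in the buffer
--             is the expected one.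
--
--     Return a list of line numbers (0-based) with an EOL that does not match
--     the expected EOL.
--     """
--     lines = buffer.splitlines(1)
--     lfs = []; crs = []; crlfs = []
--     for i in range(len(lines)):
--         line = lines[i]
--         if line.endswith("\r\n"): crlfs.append(i)
--         elif line.endswith("\n"): lfs.append(i)
--         elif line.endswith("\r"): crs.append(i)
--
--     # Determine the expected EOL.
--     if expectedEOL is None:
--         eols = [(len(crlfs), EOL_CRLF),
--                 (len(crs), EOL_CR),
--                 (len(lfs), EOL_LF)]
--         eols.sort()   # last in the list is the most common
--         expectedEOL = eols[-1][1]
--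
--     # Get the list of lines with unexpected EOLs.
--     if expectedEOL == EOL_LF:
--         mixedEOLs = crs + crlfs
--     elif expectedEOL == EOL_CR:
--         mixedEOLs = lfs + crlfs
--     elif expectedEOL == EOL_CRLF:
--         mixedEOLs = crs + lfs
--     else:
--         raise ValueError("illegal 'expected EOL' value: %r")
--     mixedEOLs.sort()
--     return mixedEOLs
-- ===== SOURCE B (Python) =====
-- EOL_LF = 0
--
-- EOL_CR = 1
--
-- EOL_CRLF = 2
--
-- def getMixedEOLLineNumbers(buffer, expectedEOL=None):
--     # One pass: classify each line's EOL and tally counts; no index lists, no sort.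
--     types = []
--     n_lf = n_cr = n_crlf = 0
--     for line in buffer.splitlines(True):
--         if line.endswith("\r\n"):
--             t = EOL_CRLF; n_crlf += 1
--         elif line.endswith("\n"):
--             t = EOL_LF; n_lf += 1
--         elif line.endswith("\r"):
--             t = EOL_CR; n_cr += 1
--         else:
--             t = None
--         types.append(t)
--     if expectedEOL is None:
--         # most common EOL; ties favor CRLF, then CR, then LF
--         expectedEOL = EOL_CRLF
--         if n_cr > n_crlf:
--             expectedEOL = EOL_CR
--         if n_lf > max(n_crlf, n_cr):
--             expectedEOL = EOL_LF
--     if expectedEOL not in (EOL_LF, EOL_CR, EOL_CRLF):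
--         raise ValueError("illegal 'expected EOL' value: %r")
--     return [i for i, t in enumerate(types) if t is not None and t != expectedEOL]
-- ===== Notes on version B (the rewrite author's own statement) =====
-- stated objective: simpler
-- what changed: Replaces A's three per-EOL index lists, tuple-list sort for the most-common EOL and final concatenate-and-sort by one classification pass that records each line's EOL type and three counters, picks the expected EOL by direct comparisons, and emits the mismatching line numbers with a single ordered filter (no sorting at all).
import Mathlib
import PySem

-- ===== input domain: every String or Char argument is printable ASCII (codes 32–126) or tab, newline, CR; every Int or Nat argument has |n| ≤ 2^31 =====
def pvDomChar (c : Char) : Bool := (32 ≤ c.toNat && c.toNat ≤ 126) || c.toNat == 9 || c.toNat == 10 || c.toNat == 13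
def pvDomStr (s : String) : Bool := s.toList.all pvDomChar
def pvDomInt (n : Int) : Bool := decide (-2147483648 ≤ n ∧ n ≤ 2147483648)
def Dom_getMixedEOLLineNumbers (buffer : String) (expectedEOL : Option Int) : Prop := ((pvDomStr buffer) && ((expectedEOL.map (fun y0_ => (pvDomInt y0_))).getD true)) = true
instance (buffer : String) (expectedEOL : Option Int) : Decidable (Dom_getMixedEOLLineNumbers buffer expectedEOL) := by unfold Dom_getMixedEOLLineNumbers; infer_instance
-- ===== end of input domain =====

-- B replaces A's three index lists + tuple sort + concatenate-and-sort by a single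
-- classification pass with counters and one ordered filter (objective: simpler, no sorting).

-- shared helper: buffer.splitlines(True); exact on the stated domain, where the only
-- line breaks that can occur are "\n", "\r" and "\r\n"
def pvSplitlinesKeep (acc : List Char) : List Char → List (List Char)
  | [] => if acc = [] then [] else [acc.reverse]
  | '\n' :: rest => (acc.reverse ++ ['\n']) :: pvSplitlinesKeep [] rest
  | '\r' :: '\n' :: rest => (acc.reverse ++ ['\r', '\n']) :: pvSplitlinesKeep [] rest
  | '\r' :: rest => (acc.reverse ++ ['\r']) :: pvSplitlinesKeep [] rest
  | c :: rest => pvSplitlinesKeep (c :: acc) rest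

-- ===== PORT A =====
def getMixedEOLLineNumbers (buffer : String) (expectedEOL : Option Int) : List Int :=
  let lines := pvSplitlinesKeep [] buffer.toList
  -- for i in range(len(lines)): line = lines[i]; … append i to crlfs / lfs / crs
  let st := (PySem.List.enumerate lines).foldl
    (fun (st : List Int × List Int × List Int) il =>
      let (lfs, crs, crlfs) := st
      if PySem.Chars.endswith il.2 ['\r', '\n'] then (lfs, crs, crlfs ++ [il.1])
      else if PySem.Chars.endswith il.2 ['\n'] then (lfs ++ [il.1], crs, crlfs)
      else if PySem.Chars.endswith il.2 ['\r'] then (lfs, crs ++ [il.1], crlfs)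
      else (lfs, crs, crlfs)) ([], [], [])
  let lfs := st.1
  let crs := st.2.1
  let crlfs := st.2.2
  let expected : Int :=
    match expectedEOL with
    | none =>
      -- eols.sort(); eols[-1][1]  (Python tuples compare lexicographically)
      let eols := PySem.List.sorted
        [((crlfs.length : Int), (2 : Int)), ((crs.length : Int), 1), ((lfs.length : Int), 0)]
        (fun p => toLex p) false
      (PySem.List.pyGetD eols (-1) (0, 0)).2  -- eols[-1][1]; eols is nonempty, the default is unreachable
    | some e => e
  if expected = 0 then PySem.List.sorted (crs ++ crlfs) (fun x => x) false
  else if expected = 1 then PySem.List.sorted (lfs ++ crlfs) (fun x => x) false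
  else if expected = 2 then PySem.List.sorted (crs ++ lfs) (fun x => x) false
  else []  -- raise ValueError — excluded by Pre_

-- ===== PORT B =====
def getMixedEOLLineNumbers_alt (buffer : String) (expectedEOL : Option Int) : List Int :=
  let st := (pvSplitlinesKeep [] buffer.toList).foldl
    (fun (st : List (Option Int) × Int × Int × Int) line =>
      let (types, nlf, ncr, ncrlf) := st
      if PySem.Chars.endswith line ['\r', '\n'] then (types ++ [some 2], nlf, ncr, ncrlf + 1)
      else if PySem.Chars.endswith line ['\n'] then (types ++ [some 0], nlf + 1, ncr, ncrlf)
      else if PySem.Chars.endswith line ['\r'] then (types ++ [some 1], nlf, ncr + 1, ncrlf)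
      else (types ++ [none], nlf, ncr, ncrlf)) ([], 0, 0, 0)
  let types := st.1
  let nlf := st.2.1
  let ncr := st.2.2.1
  let ncrlf := st.2.2.2
  let e : Int :=
    match expectedEOL with
    | none =>
      let e2 : Int := if ncr > ncrlf then 1 else 2
      if nlf > max ncrlf ncr then 0 else e2
    | some e => e
  if e = 0 ∨ e = 1 ∨ e = 2 then
    (PySem.List.enumerate types).filterMap (fun it =>
      match it.2 with
      | some t => if t ≠ e then some it.1 else none
      | none => none)
  else []  -- raise ValueError — excluded by Pre_

-- ===== PRECONDITION & SPEC =====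
-- A raises ValueError (and so does B) when expectedEOL is neither None nor one of the
-- three EOL constants 0/1/2; Pre_ excludes exactly those inputs.
def Pre_getMixedEOLLineNumbers (buffer : String) (expectedEOL : Option Int) : Prop :=
  expectedEOL = none ∨ expectedEOL = some 0 ∨ expectedEOL = some 1 ∨ expectedEOL = some 2
instance (buffer : String) (expectedEOL : Option Int) : Decidable (Pre_getMixedEOLLineNumbers buffer expectedEOL) := by unfold Pre_getMixedEOLLineNumbers; infer_instance

def pvWitness_getMixedEOLLineNumbers : String × Option Int := ("a\nb\r\nc\nd\n", none)

def Spec_getMixedEOLLineNumbers (buffer : String) (expectedEOL : Option Int) (out : List Int) : Prop := out = getMixedEOLLineNumbers_alt buffer expectedEOL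
instance (buffer : String) (expectedEOL : Option Int) (out : List Int) : Decidable (Spec_getMixedEOLLineNumbers buffer expectedEOL out) := by unfold Spec_getMixedEOLLineNumbers; infer_instance

-- ===== CLAIM (what is proved, stated in full; the proofs are below) =====
def Claim_equal_getMixedEOLLineNumbers : Prop := ∀ (buffer : String) (expectedEOL : Option Int), Dom_getMixedEOLLineNumbers buffer expectedEOL → Pre_getMixedEOLLineNumbers buffer expectedEOL → Spec_getMixedEOLLineNumbers buffer expectedEOL (getMixedEOLLineNumbers buffer expectedEOL)

-- ===== LEMMAS AND PROOFS =====

-- the per-line classification both loops perform (proof-side abbreviation)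
def pvClassify (line : List Char) : Option Int :=
  if PySem.Chars.endswith line ['\r', '\n'] then some 2
  else if PySem.Chars.endswith line ['\n'] then some 0
  else if PySem.Chars.endswith line ['\r'] then some 1
  else none

-- the indices (starting at k) of the lines classified as t
def pvFilt (t : Int) (lines : List (List Char)) (k : Int) : List Int :=
  (PySem.List.enumerate lines k).filterMap
    (fun il => if pvClassify il.2 = some t then some il.1 else none)

-- the indices (starting at k) of the lines with a recognized EOL other than e
def pvMix (e : Int) (lines : List (List Char)) (k : Int) : List Int :=
  (PySem.List.enumerate lines k).filterMap (fun il =>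
    match pvClassify il.2 with
    | some t => if t ≠ e then some il.1 else none
    | none => none)

lemma pvFilt_nil (t k : Int) : pvFilt t [] k = [] := by
  simp [pvFilt, PySem.List.enumerate]

lemma pvFilt_cons (t k : Int) (l : List Char) (ls : List (List Char)) :
    pvFilt t (l :: ls) k =
      (if pvClassify l = some t then [k] else []) ++ pvFilt t ls (k + 1) := by
  simp only [pvFilt, PySem.List.enumerate]
  split_ifs <;> simp_all

lemma pvMix_cons (e k : Int) (l : List Char) (ls : List (List Char)) :
    pvMix e (l :: ls) k =
      (match pvClassify l with
       | some t => if t ≠ e then [k] else []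
       | none => []) ++ pvMix e ls (k + 1) := by
  simp only [pvMix, PySem.List.enumerate]
  rcases h : pvClassify l with _ | t <;> simp [h]
  split_ifs <;> simp_all

-- A's loop: the three index lists are the classified index filters, in index order
lemma loopA (lines : List (List Char)) (k : Int) (a b c : List Int) :
    (PySem.List.enumerate lines k).foldl
      (fun (st : List Int × List Int × List Int) il =>
        let (lfs, crs, crlfs) := st
        if PySem.Chars.endswith il.2 ['\r', '\n'] then (lfs, crs, crlfs ++ [il.1])
        else if PySem.Chars.endswith il.2 ['\n'] then (lfs ++ [il.1], crs, crlfs)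
        else if PySem.Chars.endswith il.2 ['\r'] then (lfs, crs ++ [il.1], crlfs)
        else (lfs, crs, crlfs)) (a, b, c)
    = (a ++ pvFilt 0 lines k, b ++ pvFilt 1 lines k, c ++ pvFilt 2 lines k) := by
  induction lines generalizing k a b c with
  | nil => simp [pvFilt_nil, PySem.List.enumerate]
  | cons l ls ih =>
    simp only [PySem.List.enumerate, List.foldl_cons, pvFilt_cons, pvClassify]
    split_ifs <;> simp_all [List.append_assoc]

lemma pvFilt_length_shift (t : Int) (lines : List (List Char)) (k k' : Int) :
    (pvFilt t lines k).length = (pvFilt t lines k').length := by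
  induction lines generalizing k k' with
  | nil => simp [pvFilt_nil]
  | cons l ls ih => simp only [pvFilt_cons]; split_ifs <;> simp [ih (k + 1) (k' + 1)]

-- B's loop: the type list is the classification map, the counters are the filter lengths
lemma loopB (lines : List (List Char)) (ts : List (Option Int)) (x y z : Int) :
    lines.foldl
      (fun (st : List (Option Int) × Int × Int × Int) line =>
        let (types, nlf, ncr, ncrlf) := st
        if PySem.Chars.endswith line ['\r', '\n'] then (types ++ [some 2], nlf, ncr, ncrlf + 1)
        else if PySem.Chars.endswith line ['\n'] then (types ++ [some 0], nlf + 1, ncr, ncrlf)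
        else if PySem.Chars.endswith line ['\r'] then (types ++ [some 1], nlf, ncr + 1, ncrlf)
        else (types ++ [none], nlf, ncr, ncrlf)) (ts, x, y, z)
    = (ts ++ lines.map pvClassify,
       x + ((pvFilt 0 lines 0).length : Int),
       y + ((pvFilt 1 lines 0).length : Int),
       z + ((pvFilt 2 lines 0).length : Int)) := by
  induction lines generalizing ts x y z with
  | nil => simp [pvFilt_nil]
  | cons l ls ih =>
    have hsh : ∀ t : Int, (pvFilt t ls 1).length = (pvFilt t ls 0).length :=
      fun t => pvFilt_length_shift t ls 1 0
    simp only [List.foldl_cons, List.map_cons, pvFilt_cons, pvClassify]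
    split_ifs <;> simp_all [List.append_assoc] <;> omega

lemma pvMix_ge (e : Int) (lines : List (List Char)) (k : Int) :
    ∀ x ∈ pvMix e lines k, k ≤ x := by
  induction lines generalizing k with
  | nil => simp [pvMix, PySem.List.enumerate]
  | cons l ls ih =>
    intro x hx
    rw [pvMix_cons] at hx
    rcases List.mem_append.1 hx with h | h
    · rcases hc : pvClassify l with _ | t <;> simp [hc] at h
      omega
    · have := ih (k + 1) x h; omega

lemma pvMix_pairwise (e : Int) (lines : List (List Char)) (k : Int) :
    (pvMix e lines k).Pairwise (fun a b => a < b) := by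
  induction lines generalizing k with
  | nil => simp [pvMix, PySem.List.enumerate]
  | cons l ls ih =>
    rw [pvMix_cons, List.pairwise_append]
    refine ⟨?_, ih (k + 1), ?_⟩
    · rcases hc : pvClassify l with _ | t <;> simp
      split_ifs <;> simp
    · intro a ha b hb
      have hb' := pvMix_ge e ls (k + 1) b hb
      rcases hc : pvClassify l with _ | t <;> simp [hc] at ha
      · omega

-- classification values are always 0, 1 or 2
lemma pvClassify_mem (l : List Char) (v : Int) (h : pvClassify l = some v) :
    v = 0 ∨ v = 1 ∨ v = 2 := by
  unfold pvClassify at h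
  split_ifs at h <;> simp_all

-- the ordered filter is a permutation of the concatenation of the two off-type filters
lemma pvMix_perm (e t1 t2 : Int) (ht1 : t1 ≠ e) (ht2 : t2 ≠ e) (h12 : t1 ≠ t2)
    (hcover : ∀ v : Int, v = 0 ∨ v = 1 ∨ v = 2 → v = e ∨ v = t1 ∨ v = t2)
    (lines : List (List Char)) (k : Int) :
    (pvMix e lines k).Perm (pvFilt t1 lines k ++ pvFilt t2 lines k) := by
  induction lines generalizing k with
  | nil => simp [pvMix, pvFilt_nil, PySem.List.enumerate]
  | cons l ls ih =>
    rw [pvMix_cons, pvFilt_cons, pvFilt_cons]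
    rcases hc : pvClassify l with _ | v
    · simpa using ih (k + 1)
    · simp only [hc]
      rcases hcover v (pvClassify_mem l v hc) with hv | hv | hv
      · subst hv
        rw [if_neg (by simp), if_neg (by simp [Ne.symm ht1]), if_neg (by simp [Ne.symm ht2])]
        simpa using ih (k + 1)
      · subst hv
        rw [if_pos ht1, if_pos rfl, if_neg (by simp [h12])]
        simpa using (ih (k + 1)).cons k
      · subst hv
        rw [if_pos ht2, if_neg (by simp [Ne.symm h12]), if_pos rfl]
        simpa using ((ih (k + 1)).cons k).trans List.perm_middle.symm

-- B's comprehension over enumerate(types) is pvMix of the underlying lines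
lemma mixB (e : Int) (lines : List (List Char)) (k : Int) :
    (PySem.List.enumerate (lines.map pvClassify) k).filterMap (fun it =>
      match it.2 with
      | some t => if t ≠ e then some it.1 else none
      | none => none) = pvMix e lines k := by
  induction lines generalizing k with
  | nil => simp [pvMix, PySem.List.enumerate]
  | cons l ls ih =>
    rw [List.map_cons]
    simp only [PySem.List.enumerate, List.filterMap_cons, pvMix_cons, ← ih (k + 1)]
    rcases hc : pvClassify l with _ | t <;> simp
    split_ifs <;> simp

-- A's eols.sort(); eols[-1][1] is B's arithmetic tie-break
lemma sortLast (c2 c1 c0 : Int) :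
    (PySem.List.pyGetD
      (PySem.List.sorted [(c2, (2 : Int)), (c1, 1), (c0, 0)] (fun p => toLex p) false)
      (-1) (0, 0)).2
    = if c0 > max c2 c1 then 0 else if c1 > c2 then 1 else 2 := by
  simp only [PySem.List.sorted, PySem.List.insertBy, List.foldl, Prod.Lex.toLex_lt_toLex]
  norm_num
  split_ifs <;>
    simp_all [PySem.List.insertBy, PySem.List.pyGetD, PySem.List.pyGet?, PySem.List.pyIdx?] <;>
    (try omega) <;>
    split_ifs <;>
    simp_all <;> omega

-- A's final dispatch equals B's ordered filter, for any legal expected EOL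
lemma finalStep (lines : List (List Char)) (E : Int) (hE : E = 0 ∨ E = 1 ∨ E = 2) :
    (if E = 0 then PySem.List.sorted (pvFilt 1 lines 0 ++ pvFilt 2 lines 0) (fun x => x) false
     else if E = 1 then PySem.List.sorted (pvFilt 0 lines 0 ++ pvFilt 2 lines 0) (fun x => x) false
     else if E = 2 then PySem.List.sorted (pvFilt 1 lines 0 ++ pvFilt 0 lines 0) (fun x => x) false
     else [])
    = pvMix E lines 0 := by
  rcases hE with h | h | h <;> subst h <;> norm_num <;>
    exact PySem.List.sorted_eq_of_perm_of_pairwise_lt _ _ _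
      (pvMix_perm _ _ _ (by omega) (by omega) (by omega) (by omega) lines 0)
      (pvMix_pairwise _ lines 0)

-- ===== VERDICT (by name: the statement is the Claim_ definition above) =====
theorem getMixedEOLLineNumbers_spec : Claim_equal_getMixedEOLLineNumbers := by
  intro buffer expectedEOL _ hpre
  rcases hpre with h | h | h | h <;> subst h <;>
    simp only [Spec_getMixedEOLLineNumbers, getMixedEOLLineNumbers, getMixedEOLLineNumbers_alt,
      loopA (pvSplitlinesKeep [] buffer.toList) 0 [] [] [],
      loopB (pvSplitlinesKeep [] buffer.toList) [] 0 0 0,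
      List.nil_append, zero_add, mixB]
  · rw [sortLast]
    have hE : (if ((pvFilt 0 (pvSplitlinesKeep [] buffer.toList) 0).length : Int) >
          max ((pvFilt 2 (pvSplitlinesKeep [] buffer.toList) 0).length : Int)
            ((pvFilt 1 (pvSplitlinesKeep [] buffer.toList) 0).length : Int) then (0 : Int)
        else if ((pvFilt 1 (pvSplitlinesKeep [] buffer.toList) 0).length : Int) >
            ((pvFilt 2 (pvSplitlinesKeep [] buffer.toList) 0).length : Int) then (1 : Int)
        else (2 : Int)) = 0 ∨
        (if ((pvFilt 0 (pvSplitlinesKeep [] buffer.toList) 0).length : Int) >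
          max ((pvFilt 2 (pvSplitlinesKeep [] buffer.toList) 0).length : Int)
            ((pvFilt 1 (pvSplitlinesKeep [] buffer.toList) 0).length : Int) then (0 : Int)
        else if ((pvFilt 1 (pvSplitlinesKeep [] buffer.toList) 0).length : Int) >
            ((pvFilt 2 (pvSplitlinesKeep [] buffer.toList) 0).length : Int) then (1 : Int)
        else (2 : Int)) = 1 ∨
        (if ((pvFilt 0 (pvSplitlinesKeep [] buffer.toList) 0).length : Int) >
          max ((pvFilt 2 (pvSplitlinesKeep [] buffer.toList) 0).length : Int)
            ((pvFilt 1 (pvSplitlinesKeep [] buffer.toList) 0).length : Int) then (0 : Int)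
        else if ((pvFilt 1 (pvSplitlinesKeep [] buffer.toList) 0).length : Int) >
            ((pvFilt 2 (pvSplitlinesKeep [] buffer.toList) 0).length : Int) then (1 : Int)
        else (2 : Int)) = 2 := by split_ifs <;> simp
    rw [if_pos hE]
    exact finalStep _ _ hE
  · have := finalStep (pvSplitlinesKeep [] buffer.toList) 0 (by norm_num)
    norm_num at this ⊢
    exact this
  · have := finalStep (pvSplitlinesKeep [] buffer.toList) 1 (by norm_num)
    norm_num at this ⊢
    exact this
  · have := finalStep (pvSplitlinesKeep [] buffer.toList) 2 (by norm_num)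
    norm_num at this ⊢
    exact this
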